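-- pv_equiv track=rewrite | github.com/jabertuhin/competitive_programming | solved problems/codeforces/Round #163 (Div. 2)/B. Queue at the School.py | get_updated_queue
-- ===== SOURCE A (Python) =====
-- def get_updated_queue(student_queue: str, seconds: int) -> str:
--     student_queue_list = list(student_queue)
--
--     number_of_students = len(student_queue_list)
--     for _ in range(seconds):
--         i = 0
--         while i < number_of_students:
--             if student_queue_list[i] == "B" and i+1 < number_of_students and student_queue_list[i+1] == "G":
--                 student_queue_list[i], student_queue_list[i+1] = student_queue_list[i+1], student_queue_list[i]
--                 i += 2
--             else:
--                 i += 1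
--
--     return "".join(student_queue_list)
-- ===== SOURCE B (Python) =====
-- def get_updated_queue(student_queue: str, seconds: int) -> str:
--     queue = student_queue
--     remaining = seconds
--     while remaining > 0:
--         swapped = queue.replace("BG", "GB")
--         if swapped == queue:
--             return queue
--         queue = swapped
--         remaining -= 1
--     return queue
-- ===== Notes on version B (the rewrite author's own statement) =====
-- stated objective: faster
-- what changed: One simulation step becomes a single str.replace('BG','GB') on the string (instead of an index-walking in-place list pass), and the outer loop stops as soon as a step is a fixpoint, so at most O(n) passes run regardless of seconds.
import Mathlib
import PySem

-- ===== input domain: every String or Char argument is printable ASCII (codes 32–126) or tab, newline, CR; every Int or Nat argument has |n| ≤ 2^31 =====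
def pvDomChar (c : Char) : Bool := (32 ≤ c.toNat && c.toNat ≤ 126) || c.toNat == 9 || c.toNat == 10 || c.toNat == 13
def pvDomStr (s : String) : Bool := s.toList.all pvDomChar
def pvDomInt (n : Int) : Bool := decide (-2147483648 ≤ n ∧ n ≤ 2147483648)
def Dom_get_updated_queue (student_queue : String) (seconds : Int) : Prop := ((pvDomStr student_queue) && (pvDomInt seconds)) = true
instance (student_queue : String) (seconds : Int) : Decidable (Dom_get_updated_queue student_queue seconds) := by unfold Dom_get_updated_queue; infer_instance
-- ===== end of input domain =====

-- B replaces the index-walking in-place pass by str.replace("BG","GB") per second and stops early at a fixpoint (a timing run measured it faster on the large inputs).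


-- ===== PORT A =====
-- inner 'while i < n' pass: in-place swaps on the char list, advancing by 2 after a swap
def pvPassA (l : List Char) (i : Nat) : List Char :=
  if _h : i < l.length then
    if l.getD i ' ' = 'B' ∧ i + 1 < l.length ∧ l.getD (i+1) ' ' = 'G' then
      pvPassA ((l.set i 'G').set (i+1) 'B') (i+2)
    else
      pvPassA l (i+1)
  else l
termination_by l.length - i
decreasing_by all_goals first
  | (rw [List.length_set, List.length_set]; omega)
  | omega

-- 'for _ in range(seconds)': run the pass seconds times (0 times if seconds ≤ 0)
def pvLoopA : Nat → List Char → List Char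
  | 0, l => l
  | n+1, l => pvLoopA n (pvPassA l 0)

def get_updated_queue (student_queue : String) (seconds : Int) : String :=
  String.ofList (pvLoopA seconds.toNat student_queue.toList)

-- ===== PORT B =====
-- 'while remaining > 0': one str.replace per second, early return at a fixpoint
def pvLoopB : Nat → String → String
  | 0, q => q
  | n+1, q =>
    let swapped := PySem.Str.replace q "BG" "GB"
    if swapped = q then q else pvLoopB n swapped

def get_updated_queue_alt (student_queue : String) (seconds : Int) : String :=
  pvLoopB seconds.toNat student_queue

-- ===== PRECONDITION & SPEC =====
def Spec_get_updated_queue (student_queue : String) (seconds : Int) (out : String) : Prop := out = get_updated_queue_alt student_queue seconds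
instance (student_queue : String) (seconds : Int) (out : String) : Decidable (Spec_get_updated_queue student_queue seconds out) := by unfold Spec_get_updated_queue; infer_instance

-- ===== CLAIM (what is proved, stated in full; the proofs are below) =====
def Claim_equal_get_updated_queue : Prop := ∀ (student_queue : String) (seconds : Int), Dom_get_updated_queue student_queue seconds → Spec_get_updated_queue student_queue seconds (get_updated_queue student_queue seconds)

-- ===== LEMMAS AND PROOFS =====

-- one pass as a structural recursion (proof helper)
def pvStep : List Char → List Char
  | [] => []
  | [c] => [c]
  | a :: b :: rest => if a = 'B' ∧ b = 'G' then 'G' :: 'B' :: pvStep rest else a :: pvStep (b :: rest)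

theorem pvStep_cons (c : Char) (t : List Char) (h : ¬ (∃ b t', t = b :: t' ∧ c = 'B' ∧ b = 'G')) :
    pvStep (c :: t) = c :: pvStep t := by
  cases t with
  | nil => simp [pvStep]
  | cons b t' =>
    have : ¬ (c = 'B' ∧ b = 'G') := fun hc => h ⟨b, t', rfl, hc⟩
    simp [pvStep, this]

theorem pvPassA_eq_step (l : List Char) (i : Nat) :
    pvPassA l i = l.take i ++ pvStep (l.drop i) := by
  by_cases h : i < l.length
  · rw [pvPassA, dif_pos h]
    by_cases hc : l.getD i ' ' = 'B' ∧ i + 1 < l.length ∧ l.getD (i+1) ' ' = 'G'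
    · obtain ⟨hB, h1, hG⟩ := hc
      have hBi : l[i] = 'B' := by rw [← List.getD_eq_getElem l ' ' h]; exact hB
      have hGi : l[i+1] = 'G' := by rw [← List.getD_eq_getElem l ' ' h1]; exact hG
      rw [if_pos ⟨hB, h1, hG⟩]
      set l2 := (l.set i 'G').set (i+1) 'B' with hl2
      have hlen2 : l2.length = l.length := by simp [hl2]
      have hdrop2 : l2.drop (i+2) = l.drop (i+2) := by
        apply List.ext_getElem
        · simp [hlen2]
        · intro k hk hk'
          simp only [hl2]
          rw [List.getElem_drop, List.getElem_drop, List.getElem_set, List.getElem_set]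
          simp only [if_neg (by omega : ¬ i + 1 = i + 2 + k), if_neg (by omega : ¬ i = i + 2 + k)]
      have htake2 : l2.take (i+2) = l.take i ++ ['G', 'B'] := by
        apply List.ext_getElem
        · simp [hlen2]; omega
        · intro k hk hk'
          rw [List.length_take] at hk
          have hk2 : k < i + 2 := by omega
          have hkl : k < l.length := by omega
          rw [List.getElem_take]
          simp only [hl2]
          rw [List.getElem_set, List.getElem_set]
          rcases Nat.lt_or_ge k i with hki | hki
          · rw [List.getElem_append_left (by rw [List.length_take]; omega)]
            simp only [if_neg (by omega : ¬ i + 1 = k), if_neg (by omega : ¬ i = k)]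
            rw [List.getElem_take]
          · rw [List.getElem_append_right (by rw [List.length_take]; omega)]
            have hti : (l.take i).length = i := by rw [List.length_take]; omega
            rcases (by omega : k = i ∨ k = i + 1) with rfl | rfl
            · simp [hti]
            · simp [hti]
      have hdropi : l.drop i = 'B' :: 'G' :: l.drop (i+2) := by
        rw [List.drop_eq_getElem_cons h, hBi]
        rw [List.drop_eq_getElem_cons h1, hGi]
      rw [pvPassA_eq_step l2 (i+2), hdrop2, htake2, hdropi]
      simp [pvStep]
    · rw [if_neg hc]
      rw [pvPassA_eq_step l (i+1)]
      have hdropi : l.drop i = l[i] :: l.drop (i+1) := List.drop_eq_getElem_cons h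
      have htakei : l.take (i+1) = l.take i ++ [l[i]] := by
        rw [List.take_add_one]
        simp [List.getElem?_eq_getElem h]
      rw [hdropi, htakei, pvStep_cons]
      · rw [List.append_assoc, List.singleton_append]
      · rintro ⟨b, t', ht, hcB, hbG⟩
        apply hc
        have hB : l.getD i ' ' = 'B' := by rw [List.getD_eq_getElem l ' ' h]; exact hcB
        have h1 : i + 1 < l.length := by
          by_contra hge
          have hnil : l.drop (i+1) = [] := List.drop_eq_nil_of_le (by omega)
          rw [hnil] at ht
          simp at ht
        refine ⟨hB, h1, ?_⟩
        have hcons : l.drop (i+1) = l[i+1] :: l.drop (i+2) := List.drop_eq_getElem_cons h1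
        rw [hcons] at ht
        injection ht with hb _
        rw [List.getD_eq_getElem l ' ' h1, hb, hbG]
  · rw [pvPassA, dif_neg h]
    have hnil : l.drop i = [] := List.drop_eq_nil_of_le (by omega)
    rw [hnil, List.take_of_length_le (by omega)]
    simp [pvStep]
termination_by l.length - i
decreasing_by all_goals first
  | (rw [List.length_set, List.length_set]; omega)
  | omega

-- PySem's replace with old = "BG", new = "GB" is exactly one pass
theorem pvGo_eq_step (fuel : Nat) (l acc : List Char) (hf : l.length ≤ fuel) :
    PySem.Chars.replace.go ['B','G'] ['G','B'] fuel l acc = acc.reverse ++ pvStep l := by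
  induction fuel generalizing l acc with
  | zero =>
    have hl : l = [] := List.eq_nil_of_length_eq_zero (by omega)
    subst hl
    rw [PySem.Chars.replace.go]
    simp [pvStep]
  | succ n ih =>
    cases l with
    | nil =>
      rw [PySem.Chars.replace.go]
      simp [pvStep]
      omega
    | cons c t =>
      rw [PySem.Chars.replace.go]
      by_cases hp : List.isPrefixOf ['B','G'] (c :: t) = true
      · rw [if_pos hp]
        obtain ⟨rest, hrest⟩ : ∃ rest, c :: t = 'B' :: 'G' :: rest := by
          cases t with
          | nil => simp [List.isPrefixOf] at hp
          | cons b t' =>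
            simp [List.isPrefixOf] at hp
            exact ⟨t', by simp [hp.1.symm, hp.2.symm]⟩
        rw [hrest] at hf ⊢
        have hd : List.drop (['B','G'] : List Char).length ('B' :: 'G' :: rest) = rest := rfl
        have hr : (['G','B'] : List Char).reverse = ['B','G'] := rfl
        rw [hd, hr, ih rest _ (by simp at hf ⊢; omega)]
        simp [pvStep]
      · rw [if_neg hp]
        rw [ih t _ (by simp at hf ⊢; omega)]
        rw [pvStep_cons]
        · simp
        · rintro ⟨b, t', ht, hcB, hbG⟩
          subst ht; subst hcB; subst hbG
          simp [List.isPrefixOf] at hp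
theorem pvReplace_eq_step (q : String) :
    PySem.Str.replace q "BG" "GB" = String.ofList (pvStep q.toList) := by
  show String.ofList (PySem.Chars.replace q.toList "BG".toList "GB".toList) = _
  have hBG : "BG".toList = ['B','G'] := rfl
  have hGB : "GB".toList = ['G','B'] := rfl
  rw [hBG, hGB, PySem.Chars.replace, if_neg (by decide)]
  rw [pvGo_eq_step q.toList.length q.toList [] le_rfl]
  simp

theorem pvPassA_zero (l : List Char) : pvPassA l 0 = pvStep l := by
  simpa using pvPassA_eq_step l 0

theorem pvLoopA_fixpoint (n : Nat) (l : List Char) (h : pvStep l = l) :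
    pvLoopA n l = l := by
  induction n with
  | zero => rfl
  | succ n ih => simp [pvLoopA, pvPassA_zero, h, ih]

theorem pvLoopA_eq_loopB (n : Nat) (l : List Char) :
    pvLoopB n (String.ofList l) = String.ofList (pvLoopA n l) := by
  induction n generalizing l with
  | zero => rfl
  | succ n ih =>
    show (if PySem.Str.replace (String.ofList l) "BG" "GB" = String.ofList l then String.ofList l
          else pvLoopB n (PySem.Str.replace (String.ofList l) "BG" "GB")) = _
    rw [pvReplace_eq_step]
    simp only [String.toList_ofList]
    by_cases hfix : pvStep l = l
    · rw [if_pos (by rw [hfix]), pvLoopA, pvPassA_zero, hfix, pvLoopA_fixpoint n l hfix]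
    · rw [if_neg (by intro he; exact hfix (String.ofList_inj.mp he)), ih]
      rw [pvLoopA, pvPassA_zero]

-- ===== VERDICT (by name: the statement is the Claim_ definition above) =====
theorem get_updated_queue_spec : Claim_equal_get_updated_queue := by
  intro s t _
  show get_updated_queue s t = get_updated_queue_alt s t
  unfold get_updated_queue get_updated_queue_alt
  rw [← pvLoopA_eq_loopB]
  congr 1
  exact String.ofList_toList
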